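-- pv_equiv track=rewrite | github.com/Antonc15/TypeStrong-GroupProject | decInt.py | state4
-- ===== SOURCE A (Python) =====
-- nonZeroDigits = ['1', '2', '3', '4', '5', '6', '7', '8', '9']
--
-- def state4(word, index):
--     #Checks if given input has no characters left.
--     if index >= len(word):
--         # Since state 1 is an accepting statement, return True
--         return True
--
--     #Gets the character of input at the specified index.
--     char = word[index]
--
--     #Checks if the given character is in the array of allowed characters.
--     if char in nonZeroDigits or char  == '0':
--         #If the char is in the allowed characters it will stay in state2.
--         return state4(word, index + 1)
--
--     #Checks if the given character is an underscore.
--     elif char == "_":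
--         #If the char is an underscore it will go back to state1.
--         return state5(word, index + 1)
--
--     #If there is no valid characters it will be rejected and return false.
--     return False
--
-- def state5(word, index):
--     #Checks if the given input has no more characters left.
--     if index >= len(word):
--         # Since state 0 isn't an accepting statement, return False.
--         return False
--
--     #Gets the character of input at the specified index.
--     char = word[index]
--
--     #Checks if the given character is in the array of allowed characters.
--     if char in nonZeroDigits or char  == '0':
--         #If the char is in the allowed characters it will go into the next state (state2).
--         return state4(word, index + 1)
--
--     #If there are no valid characters it will be rejected and return False.
--     return False
-- ===== SOURCE B (Python) =====
-- DIGITS = '0123456789'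
--
-- def state4(word, index):
--     # Validate the suffix word[index:] as digits with single '_' separators:
--     # (1) only digits/underscores, (2) no two adjacent underscores, (3) no trailing underscore.
--     s = word[index:]
--     ok_chars = all(c in DIGITS or c == '_' for c in s)
--     no_double = all(not (a == '_' and b == '_') for a, b in zip(s, s[1:]))
--     no_trailing = (s == '' or s[-1] != '_')
--     return ok_chars and no_double and no_trailing
-- ===== Notes on version B (the rewrite author's own statement) =====
-- stated objective: simpler
-- what changed: Replaces the mutually recursive two-state DFA scan with the conjunction of three independent properties of the slice word[index:] (only digits/underscore, no two adjacent underscores, no trailing underscore).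
-- outside the precondition, e.g. on state4('a1', -1): A returns False, B returns True
import Mathlib
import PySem

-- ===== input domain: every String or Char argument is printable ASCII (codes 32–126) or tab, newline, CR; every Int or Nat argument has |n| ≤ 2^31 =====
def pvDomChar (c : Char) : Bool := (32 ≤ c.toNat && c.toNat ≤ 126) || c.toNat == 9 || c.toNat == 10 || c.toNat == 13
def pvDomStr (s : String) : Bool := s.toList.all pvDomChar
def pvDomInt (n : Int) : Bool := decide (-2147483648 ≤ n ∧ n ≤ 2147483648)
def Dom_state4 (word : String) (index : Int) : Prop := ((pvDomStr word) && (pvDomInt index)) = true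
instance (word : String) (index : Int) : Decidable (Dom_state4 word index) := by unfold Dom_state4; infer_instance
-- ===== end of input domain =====

-- B replaces A's mutually recursive two-state DFA by the conjunction of three independent
-- properties of the slice word[index:]; objective: simpler.

-- ===== PORT A =====
def nonZeroDigits : List Char := ['1', '2', '3', '4', '5', '6', '7', '8', '9']

mutual
def state4 (word : String) (index : Int) : Bool :=
  if PySem.Str.len word ≤ index then true
  else
    match PySem.Str.pyGet? word index with
    | none => false            -- word[index] raises IndexError (only for index < -len(word))
    | some char =>
      if char ∈ nonZeroDigits ∨ char = '0' then state4 word (index + 1)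
      else if char = '_' then state5 word (index + 1)
      else false
  termination_by ((PySem.Str.len word) - index).toNat
  decreasing_by all_goals simp only [PySem.Str.len_eq] at *; omega

def state5 (word : String) (index : Int) : Bool :=
  if PySem.Str.len word ≤ index then false
  else
    match PySem.Str.pyGet? word index with
    | none => false            -- word[index] raises IndexError (only for index < -len(word))
    | some char =>
      if char ∈ nonZeroDigits ∨ char = '0' then state4 word (index + 1)
      else false
  termination_by ((PySem.Str.len word) - index).toNat
  decreasing_by all_goals simp only [PySem.Str.len_eq] at *; omega
end

-- ===== PORT B =====
def pvDIGITS : List Char := ['0', '1', '2', '3', '4', '5', '6', '7', '8', '9']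

def state4_alt (word : String) (index : Int) : Bool :=
  let s := PySem.List.slice word.toList (some index) none
  let okChars := s.all (fun c => decide (c ∈ pvDIGITS) || decide (c = '_'))
  let noDouble := (s.zip s.tail).all (fun p => !(decide (p.1 = '_') && decide (p.2 = '_')))
  let noTrailing := s.isEmpty || !(s.getLast? == some '_')
  okChars && noDouble && noTrailing

-- ===== PRECONDITION & SPEC =====
-- Pre_ restricts to nonnegative positions, the scanner's natural domain: on a negative index A
-- raises IndexError when index < -len(word), and otherwise Python's negative-index wraparound makes
-- A rescan the whole word from position 0 after the tail — a corner no caller of this DFA helper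
-- specifies — while B validates the slice word[index:].
def Pre_state4 (word : String) (index : Int) : Prop := 0 ≤ index
instance (word : String) (index : Int) : Decidable (Pre_state4 word index) := by unfold Pre_state4; infer_instance
def pvWitness_state4 : String × Int := ("1_23", 0)

def Spec_state4 (word : String) (index : Int) (out : Bool) : Prop := out = state4_alt word index
instance (word : String) (index : Int) (out : Bool) : Decidable (Spec_state4 word index out) := by unfold Spec_state4; infer_instance

-- ===== CLAIM (what is proved, stated in full; the proofs are below) =====
def Claim_equal_state4 : Prop := ∀ (word : String) (index : Int), Dom_state4 word index → Pre_state4 word index → Spec_state4 word index (state4 word index)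

-- ===== LEMMAS AND PROOFS =====

-- A's two DFA states, on the list of remaining characters.
mutual
def pvA4 : List Char → Bool
  | [] => true
  | c :: r =>
    if c ∈ nonZeroDigits ∨ c = '0' then pvA4 r
    else if c = '_' then pvA5 r
    else false

def pvA5 : List Char → Bool
  | [] => false
  | c :: r => if c ∈ nonZeroDigits ∨ c = '0' then pvA4 r else false
end

-- B's three-property check, on a list of characters.
def pvB (s : List Char) : Bool :=
  (s.all (fun c => decide (c ∈ pvDIGITS) || decide (c = '_'))) &&
  ((s.zip s.tail).all (fun p => !(decide (p.1 = '_') && decide (p.2 = '_')))) &&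
  (s.isEmpty || !(s.getLast? == some '_'))

lemma pvB_alt (word : String) (index : Int) (h : 0 ≤ index) :
    state4_alt word index = pvB (word.toList.drop index.toNat) := by
  simp [state4_alt, pvB, PySem.List.slice_from _ h]

lemma pvDigit_iff (c : Char) : (c ∈ nonZeroDigits ∨ c = '0') ↔ c ∈ pvDIGITS := by
  simp [nonZeroDigits, pvDIGITS]; tauto

lemma pvDigit_ne_underscore {c : Char} (h : c ∈ nonZeroDigits ∨ c = '0') : c ≠ '_' := by
  rcases h with h | h
  · fin_cases h <;> decide
  · subst h; decide

-- prepending a digit does not change B's verdict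
lemma pvB_cons_digit {c : Char} (r : List Char) (hd : c ∈ nonZeroDigits ∨ c = '0') :
    pvB (c :: r) = pvB r := by
  have hcd : c ∈ pvDIGITS := (pvDigit_iff c).mp hd
  have hcu : c ≠ '_' := pvDigit_ne_underscore hd
  cases r with
  | nil => simp [pvB, hcd, hcu]
  | cons d t => simp [pvB, hcd, hcu, List.getLast?_cons_cons, Bool.and_assoc]

-- B's verdict after a leading underscore
lemma pvB_cons_underscore (r : List Char) :
    pvB ('_' :: r) = (match r with
                      | [] => false
                      | d :: t => decide (d ∈ nonZeroDigits ∨ d = '0') && pvB (d :: t)) := by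
  cases r with
  | nil => simp [pvB]
  | cons d t =>
    by_cases hdd : d ∈ nonZeroDigits ∨ d = '0'
    · have hdu : d ≠ '_' := pvDigit_ne_underscore hdd
      simp [pvB, hdd, hdu, List.getLast?_cons_cons, Bool.and_assoc]
    · by_cases hdu : d = '_'
      · subst hdu; simp [pvB, nonZeroDigits]
      · have hnd : d ∉ pvDIGITS := fun h => hdd ((pvDigit_iff d).mpr h)
        simp [pvB, hdd, hdu, hnd]

-- a character that is neither a digit nor an underscore refutes B
lemma pvB_cons_bad {c : Char} (r : List Char)
    (hd : ¬ (c ∈ nonZeroDigits ∨ c = '0')) (hu : c ≠ '_') : pvB (c :: r) = false := by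
  have hnd : c ∉ pvDIGITS := fun h => hd ((pvDigit_iff c).mpr h)
  simp [pvB, hnd, hu]

-- the joint characterisation of A's two DFA states by B's three properties
lemma pvA_eq_pvB : ∀ l : List Char,
    pvA4 l = pvB l ∧
    pvA5 l = (match l with
              | [] => false
              | c :: r => decide (c ∈ nonZeroDigits ∨ c = '0') && pvB r) := by
  intro l
  induction l with
  | nil => simp [pvA4, pvA5, pvB]
  | cons c r ih =>
    obtain ⟨ih4, ih5⟩ := ih
    constructor
    · by_cases hd : c ∈ nonZeroDigits ∨ c = '0'
      · rw [pvA4, if_pos hd, ih4, pvB_cons_digit r hd]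
      · by_cases hu : c = '_'
        · subst hu
          rw [pvA4, if_neg hd, if_pos rfl, ih5, pvB_cons_underscore r]
          cases r with
          | nil => rfl
          | cons d t =>
            by_cases hdd : d ∈ nonZeroDigits ∨ d = '0'
            · simp [hdd, pvB_cons_digit t hdd]
            · simp [hdd]
        · rw [pvA4, if_neg hd, if_neg hu, pvB_cons_bad r hd hu]
    · rw [pvA5]
      by_cases hd : c ∈ nonZeroDigits ∨ c = '0'
      · simp [hd, ih4]
      · simp [hd]

-- bridge: for 0 ≤ index, A's string/Int recursion computes pvA4/pvA5 on the dropped suffix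
lemma pvA_bridge : ∀ (n : Nat) (word : String) (index : Int), 0 ≤ index →
    n = word.toList.length - index.toNat →
    state4 word index = pvA4 (word.toList.drop index.toNat) ∧
    state5 word index = pvA5 (word.toList.drop index.toNat) := by
  intro n
  induction n with
  | zero =>
    intro word index h0 hn
    have hle : (PySem.Str.len word) ≤ index := by
      simp only [PySem.Str.len_eq]; omega
    have hdrop : word.toList.drop index.toNat = [] :=
      List.drop_eq_nil_of_le (by omega)
    constructor
    · rw [state4, if_pos hle, hdrop]; rfl
    · rw [state5, if_pos hle, hdrop]; rfl
  | succ m ih =>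
    intro word index h0 hn
    have hlt : index.toNat < word.toList.length := by omega
    have hnle : ¬ (PySem.Str.len word) ≤ index := by
      simp only [PySem.Str.len_eq]; omega
    have hget : PySem.Str.pyGet? word index = some (word.toList[index.toNat]) := by
      have h1 : PySem.Str.pyGet? word index = word.toList[index.toNat]? := by
        simp [PySem.List.pyGet?_of_nonneg _ h0]
      rw [h1, List.getElem?_eq_getElem hlt]
    have hdrop : word.toList.drop index.toNat =
        word.toList[index.toNat] :: word.toList.drop (index.toNat + 1) :=
      List.drop_eq_getElem_cons hlt
    have htn : (index + 1).toNat = index.toNat + 1 := by omega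
    obtain ⟨ih4, ih5⟩ := ih word (index + 1) (by omega) (by omega)
    rw [htn] at ih4 ih5
    constructor
    · rw [state4, if_neg hnle, hget, hdrop]
      show (if word.toList[index.toNat] ∈ nonZeroDigits ∨ word.toList[index.toNat] = '0'
            then state4 word (index + 1)
            else if word.toList[index.toNat] = '_' then state5 word (index + 1) else false) =
        pvA4 (word.toList[index.toNat] :: word.toList.drop (index.toNat + 1))
      by_cases h1 : word.toList[index.toNat] ∈ nonZeroDigits ∨ word.toList[index.toNat] = '0'
      · rw [if_pos h1, ih4, pvA4, if_pos h1]
      · rw [if_neg h1]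
        by_cases h2 : word.toList[index.toNat] = '_'
        · rw [if_pos h2, ih5, pvA4, if_neg h1, if_pos h2]
        · rw [if_neg h2, pvA4, if_neg h1, if_neg h2]
    · rw [state5, if_neg hnle, hget, hdrop]
      show (if word.toList[index.toNat] ∈ nonZeroDigits ∨ word.toList[index.toNat] = '0'
            then state4 word (index + 1)
            else false) =
        pvA5 (word.toList[index.toNat] :: word.toList.drop (index.toNat + 1))
      by_cases h1 : word.toList[index.toNat] ∈ nonZeroDigits ∨ word.toList[index.toNat] = '0'
      · rw [if_pos h1, ih4, pvA5, if_pos h1]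
      · rw [if_neg h1, pvA5, if_neg h1]

-- ===== VERDICT (by name: the statement is the Claim_ definition above) =====
theorem state4_spec : Claim_equal_state4 := by
  intro word index _ hpre
  unfold Spec_state4
  rw [(pvA_bridge _ word index hpre rfl).1, pvB_alt word index hpre,
    (pvA_eq_pvB _).1]
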